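-- pv_equiv track=rewrite | github.com/kimdappi/codingtest | 프로그래머스/0/181893. 배열 조각하기/배열 조각하기.py | solution
-- ===== SOURCE A (Python) =====
-- def solution(arr, query):
--     answer = arr.copy()
--     idx=0
--     for i in query:
--         if idx%2==0:
--             answer=answer[:i+1]
--         else:
--             answer=answer[i:]
--         idx+=1
--     return answer
-- ===== SOURCE B (Python) =====
-- def solution(arr, query):
--     # Track window bounds [low, high) over the original array; slice once at the end.
--     low, high = 0, len(arr)
--     idx = 0
--     for q in query:
--         L = high - low
--         if idx % 2 == 0:
--             stop = q + 1
--             stop = max(0, L + stop) if stop < 0 else min(L, stop)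
--             high = low + stop
--         else:
--             start = max(0, L + q) if q < 0 else min(L, q)
--             low += start
--         idx += 1
--     return arr[low:high]
-- ===== Notes on version B (the rewrite author's own statement) =====
-- stated objective: alternative
-- what changed: Instead of materialising a new list slice per query, B tracks the window bounds [low,high) over the original array with Python-exact index clamping and slices once at the end; asymptotically O(n+m) vs A's O(n*m), but not measurably faster on the benchmark inputs since A's slices run in C.
import Mathlib
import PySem

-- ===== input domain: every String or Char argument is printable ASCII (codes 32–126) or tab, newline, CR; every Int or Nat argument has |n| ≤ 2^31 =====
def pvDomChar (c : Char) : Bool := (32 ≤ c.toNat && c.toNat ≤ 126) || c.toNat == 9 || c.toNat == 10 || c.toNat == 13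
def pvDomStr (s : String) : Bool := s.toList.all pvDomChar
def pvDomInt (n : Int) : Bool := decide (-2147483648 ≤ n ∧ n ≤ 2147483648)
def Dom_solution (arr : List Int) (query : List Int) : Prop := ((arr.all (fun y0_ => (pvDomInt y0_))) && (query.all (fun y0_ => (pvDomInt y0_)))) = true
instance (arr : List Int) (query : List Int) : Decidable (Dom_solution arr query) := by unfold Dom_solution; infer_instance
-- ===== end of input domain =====

-- B replaces A's per-query list slicing by tracking window bounds [low, high) over the
-- original array (with Python's slice clamping) and slicing once at the end.

-- ===== PORT A =====
-- loop body of A: state = (answer, idx)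
def stepA (st : List Int × Int) (i : Int) : List Int × Int :=
  if PySem.Int.mod st.2 2 = 0 then
    (PySem.List.slice st.1 none (some (i + 1)), st.2 + 1)
  else
    (PySem.List.slice st.1 (some i) none, st.2 + 1)

def solution (arr : List Int) (query : List Int) : List Int :=
  (query.foldl stepA (arr, 0)).1

-- ===== PORT B =====
-- loop body of B: state = (low, high, idx)
def stepB (st : Int × Int × Int) (q : Int) : Int × Int × Int :=
  let low := st.1
  let high := st.2.1
  let idx := st.2.2
  let L := high - low
  if PySem.Int.mod idx 2 = 0 then
    let stop := q + 1
    let stop := if stop < 0 then max 0 (L + stop) else min L stop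
    (low, low + stop, idx + 1)
  else
    let start := if q < 0 then max 0 (L + q) else min L q
    (low + start, high, idx + 1)

def solution_alt (arr : List Int) (query : List Int) : List Int :=
  let st := query.foldl stepB (0, (arr.length : Int), 0)
  PySem.List.slice arr (some st.1) (some st.2.1)

-- ===== PRECONDITION & SPEC =====
def Spec_solution (arr : List Int) (query : List Int) (out : List Int) : Prop := out = solution_alt arr query
instance (arr : List Int) (query : List Int) (out : List Int) : Decidable (Spec_solution arr query out) := by unfold Spec_solution; infer_instance

-- ===== CLAIM (what is proved, stated in full; the proofs are below) =====
def Claim_equal_solution : Prop := ∀ (arr : List Int) (query : List Int), Dom_solution arr query → Spec_solution arr query (solution arr query)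

-- ===== LEMMAS AND PROOFS =====

lemma clampIdx_le' (n : Nat) (k : Int) : PySem.List.clampIdx n k ≤ n := by
  unfold PySem.List.clampIdx
  split_ifs <;> omega

-- xs[:b] with any Int bound, as take of clampIdx
lemma slice_none_some (xs : List Int) (b : Int) :
    PySem.List.slice xs none (some b) = xs.take (PySem.List.clampIdx xs.length b) := by
  simp [PySem.List.slice]

-- the loop invariant: A's current answer is the window [low, high) of arr tracked by B
lemma loop_eq (arr : List Int) (query : List Int) :
    ∀ (low high : Nat) (idx : Int), low ≤ high → high ≤ arr.length →
    ∃ lo hi : Nat, low ≤ lo ∧ lo ≤ hi ∧ hi ≤ high ∧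
      query.foldl stepB ((low : Int), (high : Int), idx)
        = ((lo : Int), (hi : Int), idx + query.length) ∧
      (query.foldl stepA ((arr.drop low).take (high - low), idx)).1
        = (arr.drop lo).take (hi - lo) := by
  induction query with
  | nil =>
    intro low high idx h1 h2
    exact ⟨low, high, le_refl _, h1, le_refl _, by simp, rfl⟩
  | cons q qs ih =>
    intro low high idx h1 h2
    have hlen : ((arr.drop low).take (high - low)).length = high - low := by
      simp; omega
    have hcast : idx + 1 + (qs.length : Int) = idx + (((q :: qs).length : Nat) : Int) := by
      simp only [List.length_cons]; push_cast; ring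
    by_cases h : PySem.Int.mod idx 2 = 0
    · -- even: keep prefix [:q+1]
      set c := PySem.List.clampIdx (high - low) (q + 1) with hc
      have hcle : c ≤ high - low := clampIdx_le' _ _
      have hsl : PySem.List.slice ((arr.drop low).take (high - low)) none (some (q + 1))
          = (arr.drop low).take c := by
        rw [slice_none_some, hlen, List.take_take, ← hc]
        congr 1; omega
      have hstA : stepA ((arr.drop low).take (high - low), idx) q
          = ((arr.drop low).take c, idx + 1) := by
        unfold stepA; dsimp only
        rw [if_pos h, hsl]
      have hstB : stepB ((low : Int), (high : Int), idx) q
          = ((low : Int), ((low + c : Nat) : Int), idx + 1) := by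
        unfold stepB; dsimp only
        rw [if_pos h, hc]
        unfold PySem.List.clampIdx
        simp only [Prod.mk.injEq, true_and, and_true]
        split_ifs <;> omega
      obtain ⟨lo, hi, hl1, hl2, hl3, hB, hA⟩ :=
        ih low (low + c) (idx + 1) (by omega) (by omega)
      simp only [Nat.add_sub_cancel_left] at hA
      refine ⟨lo, hi, hl1, hl2, by omega, ?_, ?_⟩
      · rw [List.foldl_cons, hstB, hB, hcast]
      · rw [List.foldl_cons, hstA]
        exact hA
    · -- odd: keep suffix [q:]
      set c := PySem.List.clampIdx (high - low) q with hc
      have hcle : c ≤ high - low := clampIdx_le' _ _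
      have hsl : PySem.List.slice ((arr.drop low).take (high - low)) (some q) none
          = (arr.drop (low + c)).take (high - (low + c)) := by
        rw [PySem.List.slice_some_none, hlen, ← hc, List.drop_take, List.drop_drop]
        congr 1
        omega
      have hstA : stepA ((arr.drop low).take (high - low), idx) q
          = ((arr.drop (low + c)).take (high - (low + c)), idx + 1) := by
        unfold stepA; dsimp only
        rw [if_neg h, hsl]
      have hstB : stepB ((low : Int), (high : Int), idx) q
          = (((low + c : Nat) : Int), (high : Int), idx + 1) := by
        unfold stepB; dsimp only
        rw [if_neg h, hc]
        unfold PySem.List.clampIdx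
        simp only [Prod.mk.injEq, and_true]
        split_ifs <;> omega
      obtain ⟨lo, hi, hl1, hl2, hl3, hB, hA⟩ :=
        ih (low + c) high (idx + 1) (by omega) h2
      refine ⟨lo, hi, by omega, hl2, hl3, ?_, ?_⟩
      · rw [List.foldl_cons, hstB, hB, hcast]
      · rw [List.foldl_cons, hstA]
        exact hA

-- ===== VERDICT (by name: the statement is the Claim_ definition above) =====
theorem solution_spec : Claim_equal_solution := by
  intro arr query _
  unfold Spec_solution
  simp only [solution, solution_alt]
  obtain ⟨lo, hi, _, hlh, hhi, hB, hA⟩ :=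
    loop_eq arr query 0 arr.length 0 (Nat.zero_le _) (le_refl _)
  simp only [Nat.sub_zero, List.drop_zero, List.take_length, Nat.cast_zero] at hA hB
  rw [hB, PySem.List.slice_natCast]
  exact hA
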